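-- pv_equiv track=rewrite | github.com/ymsk-sky/atcoder | abc275/d.py | f
-- ===== SOURCE A (Python) =====
-- d = dict()
--
-- def f(k):
--     if k == 0:
--         return 1
--     if k in d:
--         return d[k]
--     else:
--         k3 = f(k // 3)
--         d[k // 3] = k3
--         k2 = f(k // 2)
--         d[k // 2] = k2
--         return k2 + k3
-- ===== SOURCE B (Python) =====
-- def f(k):
--     # Enumerate every reachable state k // (2**i * 3**j) directly (floor
--     # divisions compose), then fill a dict bottom-up over the sorted states.
--     if k == 0:
--         return 1
--     states = set()
--     p2 = 1
--     while p2 <= k: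
--         p3 = p2
--         while p3 <= k:
--             states.add(k // p3)
--             p3 *= 3
--         p2 *= 2
--     dp = {0: 1}
--     for s in sorted(states):
--         if s:
--             dp[s] = dp[s // 2] + dp[s // 3]
--     return dp[k]
-- ===== Notes on version B (the rewrite author's own statement) =====
-- stated objective: alternative
-- what changed: Replaces the top-down memoized recursion by explicitly enumerating the reachable states k // (2^i * 3^j) with two nested product loops, then filling a dict bottom-up over the sorted states and looking up k.
import Mathlib
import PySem

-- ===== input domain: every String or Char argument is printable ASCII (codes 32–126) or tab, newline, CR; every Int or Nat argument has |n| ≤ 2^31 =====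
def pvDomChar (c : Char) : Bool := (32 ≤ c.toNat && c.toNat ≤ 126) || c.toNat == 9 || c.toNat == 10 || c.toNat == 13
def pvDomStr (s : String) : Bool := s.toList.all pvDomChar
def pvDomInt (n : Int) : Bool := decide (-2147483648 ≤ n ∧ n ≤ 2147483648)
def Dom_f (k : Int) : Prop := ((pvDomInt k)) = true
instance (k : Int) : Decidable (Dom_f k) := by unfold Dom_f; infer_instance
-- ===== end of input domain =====

-- B replaces the top-down memoized recursion by a direct enumeration of the
-- reachable states k // (2^i * 3^j) followed by a sorted bottom-up DP pass
-- (objective: alternative decomposition, same cost).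

-- ===== PORT A =====
-- Literal port of A's memoized recursion; the memo dict is threaded as state
-- (a fresh dict per call: memoization never changes the returned values).
-- The nonnegative argument (Pre_f below) is carried as a Nat, and the fuel
-- counter (strictly above k, each recursive call strictly shrinks k) only
-- makes the same computation structurally total; its 0-branch is unreachable.
def fAuxGo (fuel : Nat) (k : Nat) (d : PySem.Dict Nat Int) : Int × PySem.Dict Nat Int :=
  match fuel with
  | 0 => (1, d)
  | fuel + 1 =>
    if k = 0 then (1, d)
    else
      match d.get? k with
      | some v => (v, d)
      | none =>
        let r3 := fAuxGo fuel (k / 3) d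
        let d3 := r3.2.insert (k / 3) r3.1
        let r2 := fAuxGo fuel (k / 2) d3
        let d2 := r2.2.insert (k / 2) r2.1
        (r2.1 + r3.1, d2)

def f (k : Int) : Int := (fAuxGo (k.toNat + 1) k.toNat PySem.Dict.empty).1

-- ===== PORT B =====
-- inner while loop: `while p3 <= n: states.add(n // p3); p3 *= 3`
-- (fuel n + 1 suffices since p3 starts at ≥ 1 and strictly grows)
def innerLoopF (fuel : Nat) (n : Nat) (p3 : Nat) (st : PySem.Set Nat) : PySem.Set Nat :=
  match fuel with
  | 0 => st
  | fuel + 1 =>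
    if p3 ≤ n then innerLoopF fuel n (p3 * 3) (PySem.Set.add st (n / p3)) else st

-- outer while loop: `while p2 <= n: <inner loop from p3 = p2>; p2 *= 2`
def outerLoopF (fuel : Nat) (n : Nat) (p2 : Nat) (st : PySem.Set Nat) : PySem.Set Nat :=
  match fuel with
  | 0 => st
  | fuel + 1 =>
    if p2 ≤ n then outerLoopF fuel n (p2 * 2) (innerLoopF (n + 1) n p2 st) else st

-- Port of B: enumerate states, sort, fill the dict bottom-up, look up k.
-- (On Pre_f the final lookup can never miss; `.getD 0` only totalises it.)
def f_alt (k : Int) : Int :=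
  if k = 0 then 1
  else
    let n := k.toNat
    let states := outerLoopF (n + 1) n 1 PySem.Set.empty
    let dp := (PySem.List.sorted states (fun x => x) false).foldl
      (fun dp s =>
        if s ≠ 0 then dp.insert s (dp.getD (s / 2) 0 + dp.getD (s / 3) 0) else dp)
      (PySem.Dict.empty.insert 0 1)
    (dp.get? n).getD 0

-- ===== PRECONDITION & SPEC =====
-- Pre_f excludes negative k, on which A recurses forever (RecursionError) and
-- B raises KeyError.
def Pre_f (k : Int) : Prop := 0 ≤ k
instance (k : Int) : Decidable (Pre_f k) := by unfold Pre_f; infer_instance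
def pvWitness_f : Int := 12

def Spec_f (k : Int) (out : Int) : Prop := out = f_alt k
instance (k : Int) (out : Int) : Decidable (Spec_f k out) := by unfold Spec_f; infer_instance

-- ===== CLAIM (what is proved, stated in full; the proofs are below) =====
def Claim_equal_f : Prop := ∀ (k : Int), Dom_f k → Pre_f k → Spec_f k (f k)

-- ===== LEMMAS AND PROOFS =====

-- The mathematical recurrence both programs compute (fuel-indexed, F n uses fuel n + 1).
def FGo (fuel : Nat) (n : Nat) : Int :=
  match fuel with
  | 0 => 1
  | fuel + 1 => if n = 0 then 1 else FGo fuel (n / 2) + FGo fuel (n / 3)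

def F (n : Nat) : Int := FGo (n + 1) n

lemma FGo_irrel : ∀ (f1 : Nat), ∀ (n f2 : Nat), n < f1 → n < f2 → FGo f1 n = FGo f2 n := by
  intro f1
  induction f1 with
  | zero => intro n f2 h1 _; omega
  | succ f1 ih =>
    intro n f2 h1 h2
    cases f2 with
    | zero => omega
    | succ f2 =>
      by_cases hn : n = 0
      · simp [FGo, hn]
      · have hd2 : n / 2 < n := Nat.div_lt_self (Nat.pos_of_ne_zero hn) (by norm_num)
        have hd3 : n / 3 < n := Nat.div_lt_self (Nat.pos_of_ne_zero hn) (by norm_num)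
        simp only [FGo, hn, if_false]
        rw [ih (n / 2) f2 (by omega) (by omega), ih (n / 3) f2 (by omega) (by omega)]

lemma F_zero : F 0 = 1 := rfl

lemma F_rec (n : Nat) (hn : n ≠ 0) : F n = F (n / 2) + F (n / 3) := by
  have hd2 : n / 2 < n := Nat.div_lt_self (Nat.pos_of_ne_zero hn) (by norm_num)
  have hd3 : n / 3 < n := Nat.div_lt_self (Nat.pos_of_ne_zero hn) (by norm_num)
  show FGo (n + 1) n = _
  rw [show FGo (n + 1) n = FGo n (n / 2) + FGo n (n / 3) by simp [FGo, hn]]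
  rw [FGo_irrel n (n / 2) (n / 2 + 1) (by omega) (by omega),
      FGo_irrel n (n / 3) (n / 3 + 1) (by omega) (by omega)]
  rfl

def GoodDict (d : PySem.Dict Nat Int) : Prop := ∀ m v, d.get? m = some v → v = F m

lemma fAuxGo_correct : ∀ (fuel : Nat), ∀ (k : Nat) (d : PySem.Dict Nat Int), k < fuel →
    GoodDict d → (fAuxGo fuel k d).1 = F k ∧ GoodDict (fAuxGo fuel k d).2 := by
  intro fuel
  induction fuel with
  | zero => intro k d hk _; omega
  | succ fuel ih =>
    intro k d hk hd
    by_cases hk0 : k = 0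
    · subst hk0
      exact ⟨by simp [fAuxGo, F_zero], by simpa [fAuxGo] using hd⟩
    · have h2 : k / 2 < k := Nat.div_lt_self (Nat.pos_of_ne_zero hk0) (by norm_num)
      have h3 : k / 3 < k := Nat.div_lt_self (Nat.pos_of_ne_zero hk0) (by norm_num)
      simp only [fAuxGo, hk0, if_false]
      cases hg : d.get? k with
      | some v => exact ⟨hd _ _ hg, hd⟩
      | none =>
        simp only []
        obtain ⟨e3, g3⟩ := ih (k / 3) d (by omega) hd
        have g3' : GoodDict ((fAuxGo fuel (k / 3) d).2.insert (k / 3) (fAuxGo fuel (k / 3) d).1) := by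
          intro m v hm
          rw [PySem.Dict.get?_insert] at hm
          split_ifs at hm with hme
          · cases hm; rw [hme, e3]
          · exact g3 _ _ hm
        obtain ⟨e2, g2⟩ := ih (k / 2) _ (by omega) g3'
        refine ⟨?_, ?_⟩
        · rw [e2, e3, F_rec k hk0]
        · intro m v hm
          rw [PySem.Dict.get?_insert] at hm
          split_ifs at hm with hme
          · cases hm; rw [hme, e2]
          · exact g2 _ _ hm

lemma f_eq_F (k : Int) : f k = F k.toNat :=
  (fAuxGo_correct (k.toNat + 1) k.toNat PySem.Dict.empty (by omega)
    (by intro m v h; simp [PySem.Dict.get?_empty] at h)).1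

-- Membership in the inner loop's result (with enough fuel).
lemma mem_innerLoopF : ∀ (fuel : Nat), ∀ (n p3 : Nat), 0 < p3 → n + 1 - p3 ≤ fuel →
    ∀ (st : PySem.Set Nat) (x : Nat),
    (x ∈ innerLoopF fuel n p3 st ↔ x ∈ st ∨ ∃ j, p3 * 3 ^ j ≤ n ∧ x = n / (p3 * 3 ^ j)) := by
  intro fuel
  induction fuel with
  | zero =>
    intro n p3 hp hf st x
    simp only [innerLoopF]
    constructor
    · exact Or.inl
    · rintro (hx | ⟨j, hj, _⟩)
      · exact hx
      · exfalso
        have h1 : p3 ≤ p3 * 3 ^ j := Nat.le_mul_of_pos_right _ (Nat.pow_pos (by norm_num))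
        omega
  | succ fuel ih =>
    intro n p3 hp hf st x
    simp only [innerLoopF]
    by_cases h : p3 ≤ n
    · simp only [h, if_pos]
      rw [ih n (p3 * 3) (by omega) (by omega) _ x, PySem.Set.mem_add]
      constructor
      · rintro ((hx | hx) | ⟨j, hj, hx⟩)
        · exact Or.inl hx
        · exact Or.inr ⟨0, by simpa using h, by simpa using hx⟩
        · refine Or.inr ⟨j + 1, ?_, ?_⟩
          · calc p3 * 3 ^ (j + 1) = p3 * 3 * 3 ^ j := by ring
              _ ≤ n := hj
          · rw [hx]; ring_nf
      · rintro (hx | ⟨j, hj, hx⟩)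
        · exact Or.inl (Or.inl hx)
        · cases j with
          | zero => exact Or.inl (Or.inr (by simpa using hx))
          | succ j =>
            refine Or.inr ⟨j, ?_, ?_⟩
            · calc p3 * 3 * 3 ^ j = p3 * 3 ^ (j + 1) := by ring
                _ ≤ n := hj
            · rw [hx]; ring_nf
    · simp only [h, if_neg, not_false_iff]
      constructor
      · exact Or.inl
      · rintro (hx | ⟨j, hj, _⟩)
        · exact hx
        · exfalso
          have h1 : p3 ≤ p3 * 3 ^ j := Nat.le_mul_of_pos_right _ (Nat.pow_pos (by norm_num))
          omega

-- Membership in the outer loop's result (with enough fuel).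
lemma mem_outerLoopF : ∀ (fuel : Nat), ∀ (n p2 : Nat), 0 < p2 → n + 1 - p2 ≤ fuel →
    ∀ (st : PySem.Set Nat) (x : Nat),
    (x ∈ outerLoopF fuel n p2 st ↔
      x ∈ st ∨ ∃ i j, p2 * 2 ^ i * 3 ^ j ≤ n ∧ x = n / (p2 * 2 ^ i * 3 ^ j)) := by
  intro fuel
  induction fuel with
  | zero =>
    intro n p2 hp hf st x
    simp only [outerLoopF]
    constructor
    · exact Or.inl
    · rintro (hx | ⟨i, j, hj, _⟩)
      · exact hx
      · exfalso
        have h1 : p2 ≤ p2 * 2 ^ i * 3 ^ j := by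
          calc p2 = p2 * 1 * 1 := by ring
            _ ≤ p2 * 2 ^ i * 3 ^ j :=
              Nat.mul_le_mul (Nat.mul_le_mul_left _ (Nat.pow_pos (by norm_num)))
                (Nat.pow_pos (by norm_num))
        omega
  | succ fuel ih =>
    intro n p2 hp hf st x
    simp only [outerLoopF]
    by_cases h : p2 ≤ n
    · simp only [h, if_pos]
      rw [ih n (p2 * 2) (by omega) (by omega) _ x,
          mem_innerLoopF (n + 1) n p2 hp (by omega)]
      constructor
      · rintro ((hx | ⟨j, hj, hx⟩) | ⟨i, j, hj, hx⟩)
        · exact Or.inl hx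
        · exact Or.inr ⟨0, j, by simpa using hj, by simpa using hx⟩
        · refine Or.inr ⟨i + 1, j, ?_, ?_⟩
          · calc p2 * 2 ^ (i + 1) * 3 ^ j = p2 * 2 * 2 ^ i * 3 ^ j := by ring
              _ ≤ n := hj
          · rw [hx]; ring_nf
      · rintro (hx | ⟨i, j, hj, hx⟩)
        · exact Or.inl (Or.inl hx)
        · cases i with
          | zero => exact Or.inl (Or.inr ⟨j, by simpa using hj, by simpa using hx⟩)
          | succ i =>
            refine Or.inr ⟨i, j, ?_, ?_⟩
            · calc p2 * 2 * 2 ^ i * 3 ^ j = p2 * 2 ^ (i + 1) * 3 ^ j := by ring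
                _ ≤ n := hj
            · rw [hx]; ring_nf
    · simp only [h, if_neg, not_false_iff]
      constructor
      · exact Or.inl
      · rintro (hx | ⟨i, j, hj, _⟩)
        · exact hx
        · exfalso
          have h1 : p2 ≤ p2 * 2 ^ i * 3 ^ j := by
            calc p2 = p2 * 1 * 1 := by ring
              _ ≤ p2 * 2 ^ i * 3 ^ j :=
                Nat.mul_le_mul (Nat.mul_le_mul_left _ (Nat.pow_pos (by norm_num)))
                  (Nat.pow_pos (by norm_num))
          omega

def statesOf (n : Nat) : PySem.Set Nat := outerLoopF (n + 1) n 1 PySem.Set.empty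

lemma mem_statesOf (n x : Nat) :
    x ∈ statesOf n ↔ ∃ i j, 2 ^ i * 3 ^ j ≤ n ∧ x = n / (2 ^ i * 3 ^ j) := by
  rw [statesOf, mem_outerLoopF (n + 1) n 1 one_pos (by omega)]
  simp [PySem.Set.empty]

lemma statesOf_pos (n x : Nat) (hx : x ∈ statesOf n) : x ≠ 0 := by
  rw [mem_statesOf] at hx
  obtain ⟨i, j, hle, hx⟩ := hx
  have hd : 0 < 2 ^ i * 3 ^ j :=
    Nat.mul_pos (Nat.pow_pos (by norm_num)) (Nat.pow_pos (by norm_num))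
  have := (Nat.one_le_div_iff hd).mpr hle
  omega

lemma self_mem_statesOf (n : Nat) (hn : 1 ≤ n) : n ∈ statesOf n := by
  rw [mem_statesOf]; exact ⟨0, 0, by simpa using hn, by simp⟩

lemma statesOf_closed (n x : Nat) (hx : x ∈ statesOf n) (c : Nat) (hc : c = 2 ∨ c = 3) :
    x / c = 0 ∨ x / c ∈ statesOf n := by
  rw [mem_statesOf] at hx
  obtain ⟨i, j, hle, hx⟩ := hx
  rcases hc with hc | hc
  · subst hc
    have he : x / 2 = n / (2 ^ (i + 1) * 3 ^ j) := by
      rw [hx, Nat.div_div_eq_div_mul]; congr 1; ring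
    by_cases h : 2 ^ (i + 1) * 3 ^ j ≤ n
    · exact Or.inr (by rw [mem_statesOf]; exact ⟨i + 1, j, h, he⟩)
    · exact Or.inl (by rw [he]; exact Nat.div_eq_of_lt (by omega))
  · subst hc
    have he : x / 3 = n / (2 ^ i * 3 ^ (j + 1)) := by
      rw [hx, Nat.div_div_eq_div_mul]; congr 1; ring
    by_cases h : 2 ^ i * 3 ^ (j + 1) ≤ n
    · exact Or.inr (by rw [mem_statesOf]; exact ⟨i, j + 1, h, he⟩)
    · exact Or.inl (by rw [he]; exact Nat.div_eq_of_lt (by omega))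

lemma nodup_innerLoopF : ∀ (fuel : Nat), ∀ (n p3 : Nat) (st : PySem.Set Nat),
    st.Nodup → (innerLoopF fuel n p3 st).Nodup := by
  intro fuel
  induction fuel with
  | zero => intro n p3 st hst; simpa [innerLoopF]
  | succ fuel ih =>
    intro n p3 st hst
    simp only [innerLoopF]
    split_ifs with h
    · exact ih n (p3 * 3) _ (PySem.Set.nodup_add _ _ hst)
    · exact hst

lemma nodup_outerLoopF : ∀ (fuel : Nat), ∀ (n p2 : Nat) (st : PySem.Set Nat),
    st.Nodup → (outerLoopF fuel n p2 st).Nodup := by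
  intro fuel
  induction fuel with
  | zero => intro n p2 st hst; simpa [outerLoopF]
  | succ fuel ih =>
    intro n p2 st hst
    simp only [outerLoopF]
    split_ifs with h
    · exact ih n (p2 * 2) _ (nodup_innerLoopF (n + 1) n p2 st hst)
    · exact hst

lemma nodup_statesOf (n : Nat) : (statesOf n).Nodup :=
  nodup_outerLoopF (n + 1) n 1 PySem.Set.empty (by simp [PySem.Set.empty])

-- the fold step, exactly the lambda in f_alt
def dpStep (dp : PySem.Dict Nat Int) (s : Nat) : PySem.Dict Nat Int :=
  if s ≠ 0 then dp.insert s (dp.getD (s / 2) 0 + dp.getD (s / 3) 0) else dp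

-- Bottom-up DP over a strictly increasing, division-closed list fills correct values.
lemma fold_dp : ∀ (rest : List Nat) (dp : PySem.Dict Nat Int),
    rest.Pairwise (· < ·) →
    (∀ x ∈ rest, x ≠ 0) →
    (∀ x ∈ rest, (x / 2 = 0 ∨ (dp.get? (x / 2)).isSome ∨ x / 2 ∈ rest) ∧
                 (x / 3 = 0 ∨ (dp.get? (x / 3)).isSome ∨ x / 3 ∈ rest)) →
    dp.get? 0 = some 1 →
    (∀ y v, dp.get? y = some v → v = F y) →
    ∀ x, (x ∈ rest ∨ (dp.get? x).isSome) →
      (rest.foldl dpStep dp).get? x = some (F x) := by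
  intro rest
  induction rest with
  | nil =>
    intro dp _ _ _ _ hv x hx
    simp only [List.foldl_nil]
    rcases hx with hx | hx
    · simp at hx
    · obtain ⟨v, hvx⟩ := Option.isSome_iff_exists.mp hx
      rw [hvx, hv x v hvx]
  | cons s t ih =>
    intro dp hpw hnz hcl h0 hv x hx
    have hs0 : s ≠ 0 := hnz s (List.mem_cons_self ..)
    have hsmin : ∀ y ∈ t, s < y := (List.pairwise_cons.mp hpw).1
    -- head's subproblems are already available
    have hlt2 : s / 2 < s := Nat.div_lt_self (Nat.pos_of_ne_zero hs0) (by norm_num)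
    have hlt3 : s / 3 < s := Nat.div_lt_self (Nat.pos_of_ne_zero hs0) (by norm_num)
    have avail2 : dp.getD (s / 2) 0 = F (s / 2) := by
      rcases (hcl s (List.mem_cons_self ..)).1 with h | h | h
      · rw [h, PySem.Dict.getD_eq_get?_getD, h0]; rfl
      · obtain ⟨v, hvx⟩ := Option.isSome_iff_exists.mp h
        rw [PySem.Dict.getD_eq_get?_getD, hvx]
        simpa using hv _ _ hvx
      · exfalso
        rcases List.mem_cons.mp h with he | ht
        · omega
        · exact absurd (hsmin _ ht) (by omega)
    have avail3 : dp.getD (s / 3) 0 = F (s / 3) := by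
      rcases (hcl s (List.mem_cons_self ..)).2 with h | h | h
      · rw [h, PySem.Dict.getD_eq_get?_getD, h0]; rfl
      · obtain ⟨v, hvx⟩ := Option.isSome_iff_exists.mp h
        rw [PySem.Dict.getD_eq_get?_getD, hvx]
        simpa using hv _ _ hvx
      · exfalso
        rcases List.mem_cons.mp h with he | ht
        · omega
        · exact absurd (hsmin _ ht) (by omega)
    have hFs : dp.getD (s / 2) 0 + dp.getD (s / 3) 0 = F s := by
      rw [avail2, avail3, F_rec s hs0]
    have hstep : dpStep dp s = dp.insert s (F s) := by
      rw [dpStep, if_pos hs0, hFs]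
    simp only [List.foldl_cons, hstep]
    -- apply ih to the tail
    have h0' : (dp.insert s (F s)).get? 0 = some 1 := by
      rw [PySem.Dict.get?_insert, if_neg (Ne.symm hs0)]; exact h0
    have hv' : ∀ y v, (dp.insert s (F s)).get? y = some v → v = F y := by
      intro y v hyv
      rw [PySem.Dict.get?_insert] at hyv
      split_ifs at hyv with hys
      · cases hyv; rw [hys]
      · exact hv _ _ hyv
    have lift : ∀ y : Nat, (y = 0 ∨ (dp.get? y).isSome ∨ y ∈ s :: t) →
        (y = 0 ∨ ((dp.insert s (F s)).get? y).isSome ∨ y ∈ t) := by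
      intro y hy
      rcases hy with h | h | h
      · exact Or.inl h
      · refine Or.inr (Or.inl ?_)
        rw [PySem.Dict.get?_insert]
        split_ifs with he
        · simp
        · exact h
      · rcases List.mem_cons.mp h with he | ht
        · refine Or.inr (Or.inl ?_)
          rw [he, PySem.Dict.get?_insert_self]; simp
        · exact Or.inr (Or.inr ht)
    have hcl' : ∀ x ∈ t,
        (x / 2 = 0 ∨ ((dp.insert s (F s)).get? (x / 2)).isSome ∨ x / 2 ∈ t) ∧
        (x / 3 = 0 ∨ ((dp.insert s (F s)).get? (x / 3)).isSome ∨ x / 3 ∈ t) := by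
      intro x hxt
      exact ⟨lift _ (hcl x (List.mem_cons_of_mem _ hxt)).1,
             lift _ (hcl x (List.mem_cons_of_mem _ hxt)).2⟩
    have conc := ih (dp.insert s (F s)) (List.pairwise_cons.mp hpw).2
      (fun y hy => hnz y (List.mem_cons_of_mem _ hy)) hcl' h0' hv'
    rcases hx with hx | hx
    · rcases List.mem_cons.mp hx with he | ht
      · subst he
        exact conc x (Or.inr (by rw [PySem.Dict.get?_insert_self]; simp))
      · exact conc x (Or.inl ht)
    · refine conc x (Or.inr ?_)
      rw [PySem.Dict.get?_insert]
      split_ifs with he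
      · simp
      · exact hx

lemma f_alt_eq_F (k : Int) (hk : 0 ≤ k) : f_alt k = F k.toNat := by
  by_cases hk0 : k = 0
  · subst hk0
    rfl
  · have hn1 : 1 ≤ k.toNat := by omega
    have hLstates : ∀ x, x ∈ PySem.List.sorted (statesOf k.toNat) (fun x => x) false ↔
        x ∈ statesOf k.toNat := by
      intro x; exact PySem.List.mem_sorted ..
    have hperm : (PySem.List.sorted (statesOf k.toNat) (fun x => x) false).Perm (statesOf k.toNat) :=
      PySem.List.sorted_perm ..
    have hnd : (PySem.List.sorted (statesOf k.toNat) (fun x => x) false).Nodup :=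
      hperm.nodup_iff.mpr (nodup_statesOf k.toNat)
    have hle : (PySem.List.sorted (statesOf k.toNat) (fun x => x) false).Pairwise (· ≤ ·) :=
      PySem.List.sorted_pairwise (statesOf k.toNat) (fun x => x)
    have hlt : (PySem.List.sorted (statesOf k.toNat) (fun x => x) false).Pairwise (· < ·) := by
      have hne : (PySem.List.sorted (statesOf k.toNat) (fun x => x) false).Pairwise (· ≠ ·) := hnd
      exact (hle.and hne).imp (fun h => lt_of_le_of_ne h.1 h.2)
    have hfold := fold_dp (PySem.List.sorted (statesOf k.toNat) (fun x => x) false)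
      (PySem.Dict.empty.insert 0 1) hlt
      (fun x hx => statesOf_pos k.toNat x ((hLstates x).mp hx))
      (by
        intro x hx
        have hxs := (hLstates x).mp hx
        constructor
        · rcases statesOf_closed k.toNat x hxs 2 (Or.inl rfl) with h | h
          · exact Or.inl h
          · exact Or.inr (Or.inr ((hLstates _).mpr h))
        · rcases statesOf_closed k.toNat x hxs 3 (Or.inr rfl) with h | h
          · exact Or.inl h
          · exact Or.inr (Or.inr ((hLstates _).mpr h)))
      (PySem.Dict.get?_insert_self ..)
      (by
        intro y v hyv
        rw [PySem.Dict.get?_insert] at hyv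
        split_ifs at hyv with hy0
        · cases hyv; rw [hy0]; rfl
        · simp [PySem.Dict.get?_empty] at hyv)
      k.toNat (Or.inl ((hLstates k.toNat).mpr (self_mem_statesOf k.toNat hn1)))
    rw [f_alt, if_neg hk0]
    show ((List.foldl dpStep (PySem.Dict.empty.insert 0 1)
        (PySem.List.sorted (statesOf k.toNat) (fun x => x) false)).get? k.toNat).getD 0 =
      F k.toNat
    rw [hfold]
    rfl

-- ===== VERDICT (by name: the statement is the Claim_ definition above) =====
theorem f_spec : Claim_equal_f := by
  intro k _ hk
  unfold Spec_f
  rw [f_eq_F, f_alt_eq_F k hk]
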